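-- pv_equiv track=rewrite | github.com/lahari07/Language-Predictor | PredictLanguage.py | feature_has_KJWXY
-- ===== SOURCE A (Python) =====
-- def feature_has_KJWXY(line):
--     alphabets = ["k","K","j","J","w","W","x","X","y","Y"]
--     count = 0
--     for word in line:
--         for alphabet in alphabets:
--             count += word.count(alphabet)
--     if count > 0:
--         return True
--     else:
--         return False
-- ===== SOURCE B (Python) =====
-- def feature_has_KJWXY(line):
--     targets = set("kKjJwWxXyY")
--     return any(c in targets for word in line for c in word)
-- ===== Notes on version B (the rewrite author's own statement) =====
-- stated objective: faster
-- what changed: Replaces ten full word.count scans per word plus a total-count comparison with a single short-circuiting any() over the characters against a set of target letters.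
import Mathlib
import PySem

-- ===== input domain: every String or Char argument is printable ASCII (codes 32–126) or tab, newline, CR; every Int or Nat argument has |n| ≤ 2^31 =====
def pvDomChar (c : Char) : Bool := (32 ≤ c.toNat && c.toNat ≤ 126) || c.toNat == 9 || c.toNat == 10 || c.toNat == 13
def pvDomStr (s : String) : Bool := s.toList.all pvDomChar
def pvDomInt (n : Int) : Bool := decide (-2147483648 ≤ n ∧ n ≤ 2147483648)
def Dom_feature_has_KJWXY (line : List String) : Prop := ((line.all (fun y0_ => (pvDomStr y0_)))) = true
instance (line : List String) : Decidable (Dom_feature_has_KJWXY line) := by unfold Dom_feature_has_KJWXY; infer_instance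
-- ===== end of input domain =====

-- B replaces A's ten full per-word count scans and total comparison by one short-circuiting any() over the characters against a set of target letters (objective: simpler).

-- ===== PORT A =====
def feature_has_KJWXY (line : List String) : Bool :=
  let alphabets : List String := ["k","K","j","J","w","W","x","X","y","Y"]
  let count : Int := line.foldl (fun count word =>
    alphabets.foldl (fun count alphabet => count + (PySem.Str.count word alphabet : Int)) count) 0
  if count > 0 then true else false

-- ===== PORT B =====
def feature_has_KJWXY_alt (line : List String) : Bool :=
  let targets : PySem.Set Char := PySem.Set.ofList "kKjJwWxXyY".toList
  line.any (fun word => word.toList.any (fun c => PySem.Set.contains targets c))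

-- ===== PRECONDITION & SPEC =====
def Spec_feature_has_KJWXY (line : List String) (out : Bool) : Prop := out = feature_has_KJWXY_alt line
instance (line : List String) (out : Bool) : Decidable (Spec_feature_has_KJWXY line out) := by unfold Spec_feature_has_KJWXY; infer_instance

-- ===== CLAIM (what is proved, stated in full; the proofs are below) =====
def Claim_equal_feature_has_KJWXY : Prop := ∀ (line : List String), Dom_feature_has_KJWXY line → Spec_feature_has_KJWXY line (feature_has_KJWXY line)

-- ===== LEMMAS AND PROOFS =====

-- str.count with a single-character needle counts occurrences of that character
lemma chars_count_go_single (a : Char) : ∀ (s : List Char) (fuel acc : Nat), s.length ≤ fuel →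
    PySem.Chars.count.go [a] fuel s acc = acc + s.count a := by
  intro s
  induction s with
  | nil => intro fuel acc _; cases fuel <;> simp [PySem.Chars.count.go]
  | cons h t ih =>
    intro fuel acc hle
    cases fuel with
    | zero => simp at hle
    | succ f =>
      rw [PySem.Chars.count.go]
      by_cases hah : a = h
      · subst hah
        simp only [List.isPrefixOf, beq_self_eq_true, Bool.true_and, if_pos]
        rw [List.length_singleton, List.drop_one, List.tail_cons,
          ih f (acc + 1) (by simpa using hle)]
        simp [List.count_cons]
        omega
      · have : ([a].isPrefixOf (h :: t)) = false := by
          simp [List.isPrefixOf, hah]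
        rw [this]
        simp only [Bool.false_eq_true, if_false]
        rw [ih f acc (by simpa using hle)]
        simp [List.count_cons]
        exact fun e => hah e.symm

lemma str_count_single (w : String) (a : String) (c : Char) (h : a.toList = [c]) :
    PySem.Str.count w a = w.toList.count c := by
  rw [PySem.Str.count_eq, h]
  simp only [PySem.Chars.count, List.isEmpty_cons, Bool.false_eq_true, if_false]
  simpa using chars_count_go_single c w.toList w.toList.length 0 le_rfl

def pvScore (w : String) : Nat :=
  w.toList.count 'k' + w.toList.count 'K' + w.toList.count 'j' + w.toList.count 'J' +
  w.toList.count 'w' + w.toList.count 'W' + w.toList.count 'x' + w.toList.count 'X' +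
  w.toList.count 'y' + w.toList.count 'Y'

lemma inner_foldl_eq (c : Int) (w : String) :
    (["k","K","j","J","w","W","x","X","y","Y"] : List String).foldl
      (fun count alphabet => count + (PySem.Str.count w alphabet : Int)) c
    = c + (pvScore w : Int) := by
  have hk := str_count_single w "k" 'k' rfl
  have hK := str_count_single w "K" 'K' rfl
  have hj := str_count_single w "j" 'j' rfl
  have hJ := str_count_single w "J" 'J' rfl
  have hw := str_count_single w "w" 'w' rfl
  have hW := str_count_single w "W" 'W' rfl
  have hx := str_count_single w "x" 'x' rfl
  have hX := str_count_single w "X" 'X' rfl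
  have hy := str_count_single w "y" 'y' rfl
  have hY := str_count_single w "Y" 'Y' rfl
  simp only [List.foldl]
  rw [hk, hK, hj, hJ, hw, hW, hx, hX, hy, hY]
  simp [pvScore]
  push_cast
  ring

lemma outer_foldl_eq (line : List String) (c : Int) :
    line.foldl (fun count word =>
      (["k","K","j","J","w","W","x","X","y","Y"] : List String).foldl
        (fun count alphabet => count + (PySem.Str.count word alphabet : Int)) count) c
    = c + ((line.map pvScore).sum : Int) := by
  induction line generalizing c with
  | nil => simp
  | cons w t ih =>
    rw [List.foldl_cons, inner_foldl_eq, ih, List.map_cons, List.sum_cons]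
    push_cast
    ring

lemma score_pos_iff (w : String) :
    0 < pvScore w ↔ ∃ c ∈ w.toList, c ∈ ("kKjJwWxXyY" : String).toList := by
  constructor
  · intro h
    unfold pvScore at h
    have : ∃ a ∈ (['k','K','j','J','w','W','x','X','y','Y'] : List Char), 0 < w.toList.count a := by
      by_contra hno
      push_neg at hno
      simp only [List.mem_cons, List.not_mem_nil, or_false, Nat.pos_iff_ne_zero] at hno
      have hk := hno 'k' (by simp)
      have hK := hno 'K' (by simp)
      have hj := hno 'j' (by simp)
      have hJ := hno 'J' (by simp)
      have hw := hno 'w' (by simp)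
      have hW := hno 'W' (by simp)
      have hx := hno 'x' (by simp)
      have hX := hno 'X' (by simp)
      have hy := hno 'y' (by simp)
      have hY := hno 'Y' (by simp)
      omega
    obtain ⟨a, ha, hpos⟩ := this
    refine ⟨a, List.count_pos_iff.mp hpos, ?_⟩
    have hset : ("kKjJwWxXyY" : String).toList = ['k','K','j','J','w','W','x','X','y','Y'] := rfl
    rw [hset]; exact ha
  · rintro ⟨c, hc, hmem⟩
    have : 0 < w.toList.count c := List.count_pos_iff.mpr hc
    have hmem' : c ∈ (['k','K','j','J','w','W','x','X','y','Y'] : List Char) := hmem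
    unfold pvScore
    fin_cases hmem' <;> omega

-- ===== VERDICT (by name: the statement is the Claim_ definition above) =====
theorem feature_has_KJWXY_spec : Claim_equal_feature_has_KJWXY := by
  unfold Claim_equal_feature_has_KJWXY Spec_feature_has_KJWXY
  intro line _
  unfold feature_has_KJWXY feature_has_KJWXY_alt
  simp only [outer_foldl_eq]
  rw [show (0 : Int) + ((line.map pvScore).sum : Int) = ((line.map pvScore).sum : Int) by ring]
  by_cases h : 0 < (line.map pvScore).sum
  · have hA : ((0 : Int) < ((line.map pvScore).sum : Int)) := by exact_mod_cast h
    simp only [hA, if_pos]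
    obtain ⟨s, hs, hpos⟩ : ∃ s ∈ line.map pvScore, 0 < s := by
      by_contra hno
      push_neg at hno
      have : (line.map pvScore).sum = 0 := by
        apply List.sum_eq_zero
        intro x hx
        exact Nat.le_zero.mp (hno x hx)
      omega
    obtain ⟨w, hw, rfl⟩ := List.mem_map.mp hs
    obtain ⟨c, hc, hmem⟩ := (score_pos_iff w).mp hpos
    symm
    rw [List.any_eq_true]
    refine ⟨w, hw, ?_⟩
    rw [List.any_eq_true]
    refine ⟨c, hc, ?_⟩
    rw [PySem.Set.contains_iff, PySem.Set.mem_ofList]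
    exact hmem
  · have hz : (line.map pvScore).sum = 0 := by omega
    have hA : ¬ ((0 : Int) < ((line.map pvScore).sum : Int)) := by
      rw [hz]; simp
    simp only [hA, if_false]
    symm
    rw [List.any_eq_false]
    intro w hw
    rw [Bool.not_eq_true, List.any_eq_false]
    intro c hc
    have hsz : pvScore w = 0 := by
      have := List.sum_eq_zero_iff.mp hz (pvScore w) (List.mem_map.mpr ⟨w, hw, rfl⟩)
      exact this
    intro hcon
    rw [PySem.Set.contains_iff, PySem.Set.mem_ofList] at hcon
    have : 0 < pvScore w := (score_pos_iff w).mpr ⟨c, hc, hcon⟩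
    omega
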